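-- pv_equiv track=rewrite | github.com/Oscar-Jarrin/KeyNav | myCode/states/PrintableSequenceConversor.py | __interpretShifts
-- ===== SOURCE A (Python) =====
-- def __interpretShifts(listOfKey):
--     shiftPressed = False
--     i = 0
--     while i < len(listOfKey) and not shiftPressed:
--         shiftPressed = listOfKey[i] == "shift"
--         i = i+1
--     while i < len(listOfKey) and shiftPressed:
--         if listOfKey[i].isalpha() and shiftPressed:
--             listOfKey[i] = listOfKey[i].upper()
--         i = i + 1
--     if "shift" in listOfKey:
--         listOfKey.remove("shift")
--     return listOfKey
-- ===== SOURCE B (Python) =====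
-- def __interpretShifts(listOfKey):
--     result = []
--     seen_shift = False
--     for key in listOfKey:
--         if not seen_shift and key == "shift":
--             seen_shift = True  # drop the first shift
--         elif seen_shift and key.isalpha():
--             result.append(key.upper())
--         else:
--             result.append(key)
--     listOfKey[:] = result
--     return listOfKey
-- ===== Notes on version B (the rewrite author's own statement) =====
-- stated objective: simpler
-- what changed: Replaces A's three passes (an index loop to find the first shift, a second index loop uppercasing the suffix in place, then a membership test plus list.remove) with a single pass carrying a seen_shift flag that drops the first 'shift' and uppercases alphabetic keys after it.
import Mathlib
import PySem

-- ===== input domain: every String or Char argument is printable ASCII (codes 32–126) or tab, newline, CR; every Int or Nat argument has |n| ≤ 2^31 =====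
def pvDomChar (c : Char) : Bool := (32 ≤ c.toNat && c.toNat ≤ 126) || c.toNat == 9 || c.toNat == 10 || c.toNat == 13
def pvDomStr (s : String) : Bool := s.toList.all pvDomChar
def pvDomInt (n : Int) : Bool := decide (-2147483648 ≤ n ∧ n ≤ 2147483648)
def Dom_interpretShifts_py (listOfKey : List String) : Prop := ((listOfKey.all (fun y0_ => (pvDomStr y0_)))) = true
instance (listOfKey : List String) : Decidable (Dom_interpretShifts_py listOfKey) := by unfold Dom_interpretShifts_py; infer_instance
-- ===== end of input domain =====

-- B replaces A's three passes (find-shift loop, uppercase loop, membership test + remove) by one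
-- pass with a seen-shift flag that drops the first "shift" and uppercases alphabetic keys after it.
-- Both Pythons mutate the argument list in place and end in the same final state; the theorem is
-- about the returned value.

-- ===== PORT A =====
-- first while loop: advance i until shiftPressed becomes true; returns (i, shiftPressed)
def interpretShifts_loop1 : List String → Nat → Nat × Bool
  | [], i => (i, false)
  | x :: xs, i => if x == "shift" then (i + 1, true) else interpretShifts_loop1 xs (i + 1)

-- second while loop over the suffix from index i (shiftPressed is constant there)
def interpretShifts_loop2 (sp : Bool) : List String → List String
  | [] => []
  | x :: xs =>
      (if PySem.Str.strIsalpha x && sp then PySem.Str.upper x else x) :: interpretShifts_loop2 sp xs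

def interpretShifts_py (listOfKey : List String) : List String :=
  let r := interpretShifts_loop1 listOfKey 0
  let i := r.1
  let sp := r.2
  let l2 := if sp then listOfKey.take i ++ interpretShifts_loop2 sp (listOfKey.drop i)
            else listOfKey
  if "shift" ∈ l2 then (PySem.List.remove? l2 "shift").getD l2 else l2

-- ===== PORT B =====
-- single pass with the seen_shift flag (result list built front-to-back)
def interpretShifts_go : List String → Bool → List String
  | [], _ => []
  | x :: xs, seen =>
      if !seen && x == "shift" then interpretShifts_go xs true
      else (if seen && PySem.Str.strIsalpha x then PySem.Str.upper x else x) ::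
             interpretShifts_go xs seen

def interpretShifts_py_alt (listOfKey : List String) : List String :=
  interpretShifts_go listOfKey false

-- ===== PRECONDITION & SPEC =====
def Spec_interpretShifts_py (listOfKey : List String) (out : List String) : Prop := out = interpretShifts_py_alt listOfKey
instance (listOfKey : List String) (out : List String) : Decidable (Spec_interpretShifts_py listOfKey out) := by unfold Spec_interpretShifts_py; infer_instance

-- ===== CLAIM (what is proved, stated in full; the proofs are below) =====
def Claim_equal_interpretShifts_py : Prop := ∀ (listOfKey : List String), Dom_interpretShifts_py listOfKey → Spec_interpretShifts_py listOfKey (interpretShifts_py listOfKey)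

-- ===== LEMMAS AND PROOFS =====

lemma go_true (xs : List String) :
    interpretShifts_go xs true = interpretShifts_loop2 true xs := by
  induction xs with
  | nil => rfl
  | cons x xs ih =>
      simp [interpretShifts_go, interpretShifts_loop2, ih, Bool.and_comm]

lemma go_noshift (xs : List String) (h : "shift" ∉ xs) :
    interpretShifts_go xs false = xs := by
  induction xs with
  | nil => rfl
  | cons x xs ih =>
      have hx : x ≠ "shift" := fun hx => h (hx ▸ List.mem_cons_self ..)
      simp only [List.mem_cons, not_or] at h
      simp [interpretShifts_go, hx, ih h.2]

lemma go_split (pre suf : List String) (h : "shift" ∉ pre) :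
    interpretShifts_go (pre ++ "shift" :: suf) false = pre ++ interpretShifts_loop2 true suf := by
  induction pre with
  | nil => simp [interpretShifts_go, go_true]
  | cons x xs ih =>
      have hx : x ≠ "shift" := fun hx => h (hx ▸ List.mem_cons_self ..)
      simp only [List.mem_cons, not_or] at h
      simp [interpretShifts_go, hx, ih h.2]

lemma loop1_noshift (xs : List String) (i : Nat) (h : "shift" ∉ xs) :
    interpretShifts_loop1 xs i = (i + xs.length, false) := by
  induction xs generalizing i with
  | nil => rfl
  | cons x xs ih =>
      have hx : x ≠ "shift" := fun hx => h (hx ▸ List.mem_cons_self ..)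
      simp only [List.mem_cons, not_or] at h
      simp [interpretShifts_loop1, hx, ih _ h.2]
      omega

lemma loop1_split (pre suf : List String) (i : Nat) (h : "shift" ∉ pre) :
    interpretShifts_loop1 (pre ++ "shift" :: suf) i = (i + pre.length + 1, true) := by
  induction pre generalizing i with
  | nil => simp [interpretShifts_loop1]
  | cons x xs ih =>
      have hx : x ≠ "shift" := fun hx => h (hx ▸ List.mem_cons_self ..)
      simp only [List.mem_cons, not_or] at h
      simp [interpretShifts_loop1, hx, ih _ h.2]
      omega

lemma remove_split (pre t : List String) (h : "shift" ∉ pre) :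
    PySem.List.remove? (pre ++ "shift" :: t) "shift" = some (pre ++ t) := by
  induction pre with
  | nil => simp
  | cons x xs ih =>
      have hx : x ≠ "shift" := fun hx => h (hx ▸ List.mem_cons_self ..)
      simp only [List.mem_cons, not_or] at h
      simp [PySem.List.remove?_cons_of_ne, hx, ih h.2]

lemma take_split (pre : List String) (x : String) (suf : List String) :
    (pre ++ x :: suf).take (0 + pre.length + 1) = pre ++ [x] := by
  induction pre with
  | nil => simp
  | cons y ys ih => simpa using ih

lemma drop_split (pre : List String) (x : String) (suf : List String) :
    (pre ++ x :: suf).drop (0 + pre.length + 1) = suf := by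
  induction pre with
  | nil => simp
  | cons y ys ih => simp

lemma first_split (l : List String) (h : "shift" ∈ l) :
    ∃ pre suf, l = pre ++ "shift" :: suf ∧ "shift" ∉ pre := by
  induction l with
  | nil => cases h
  | cons x xs ih =>
      by_cases hx : x = "shift"
      · exact ⟨[], xs, by simp [hx], by simp⟩
      · have hm : "shift" ∈ xs := by
          rcases List.mem_cons.mp h with h1 | h1
          · exact absurd h1.symm hx
          · exact h1
        obtain ⟨pre, suf, heq, hpre⟩ := ih hm
        exact ⟨x :: pre, suf, by simp [heq], by simp [hpre, Ne.symm hx]⟩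

-- ===== VERDICT (by name: the statement is the Claim_ definition above) =====
theorem interpretShifts_py_spec : Claim_equal_interpretShifts_py := by
  intro l _
  unfold Spec_interpretShifts_py interpretShifts_py interpretShifts_py_alt
  by_cases hmem : "shift" ∈ l
  · obtain ⟨pre, suf, rfl, hpre⟩ := first_split l hmem
    rw [loop1_split _ _ _ hpre]
    have htake : (pre ++ "shift" :: suf).take (0 + pre.length + 1) = pre ++ ["shift"] :=
      take_split pre "shift" suf
    have hdrop : (pre ++ "shift" :: suf).drop (0 + pre.length + 1) = suf :=
      drop_split pre "shift" suf
    have hmem2 : "shift" ∈ pre ++ ["shift"] ++ interpretShifts_loop2 true suf := by simp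
    simp only [htake, hdrop, if_true, if_pos hmem2]
    rw [show pre ++ ["shift"] ++ interpretShifts_loop2 true suf
          = pre ++ "shift" :: interpretShifts_loop2 true suf by simp]
    rw [remove_split _ _ hpre, go_split _ _ hpre]
    rfl
  · rw [loop1_noshift _ _ hmem]
    simp [hmem, go_noshift l hmem]
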